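-- pv_equiv track=rewrite | github.com/a7xr/py_many_tools | AG22/AG22/services.py | iscomValide
-- ===== SOURCE A (Python) =====
-- def iscomValide(chaine):
--     """ Fonction de test si une identité commande est de la forme 3lettre-3chiffres """
--     i=0
--     j=3
--     res = True
--     AaZ = 'AZERTYUIOPQSDFGHJKLMWXCVBN'
--     if(len(chaine)!=6):
--         return False
--     while(i<3):
--         if(chaine[i] not in AaZ):
--             return False
--         i=i+1
--
--     while(j<6):
--         if(chaine[j] not in '0123456789'):
--             return False
--         j=j+1
--
--     return res
-- ===== SOURCE B (Python) =====
-- def iscomValide(chaine):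
--     """ Fonction de test si une identité commande est de la forme 3lettre-3chiffres """
--     signature = ''.join('L' if 'A' <= c <= 'Z' else 'D' if '0' <= c <= '9' else '?'
--                         for c in chaine)
--     return signature == 'LLLDDD'
-- ===== Notes on version B (the rewrite author's own statement) =====
-- stated objective: alternative
-- what changed: Replaces A's explicit length guard plus two index-driven while loops (membership in a shuffled alphabet string) by a single classification pass that maps every character to a class code and compares the whole signature string against a fixed six-letter template (the template comparison also subsumes the length check).
import Mathlib
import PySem

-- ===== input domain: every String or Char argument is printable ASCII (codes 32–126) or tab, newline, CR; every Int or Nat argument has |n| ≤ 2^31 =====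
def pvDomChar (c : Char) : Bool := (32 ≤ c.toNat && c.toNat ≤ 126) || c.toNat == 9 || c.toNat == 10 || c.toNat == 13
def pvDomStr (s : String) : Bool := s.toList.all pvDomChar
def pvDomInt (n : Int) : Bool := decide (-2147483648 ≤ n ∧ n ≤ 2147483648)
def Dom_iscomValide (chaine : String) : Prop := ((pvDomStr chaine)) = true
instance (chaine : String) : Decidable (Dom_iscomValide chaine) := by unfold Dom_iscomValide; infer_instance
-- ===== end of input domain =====

-- B replaces A's length guard + two index-driven membership loops by one classification
-- pass mapping each char to a class code, compared against the template 'LLLDDD';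
-- objective: alternative (table/template formulation), same cost.

-- ===== PORT A =====
-- first while loop: while(i<3): if chaine[i] not in AaZ: return False; i=i+1
-- ('c in AaZ' on the single char chaine[i] is char membership among the string's chars — exact here)
def iscomWhile1 (s : List Char) : Nat → Int → Bool
  | 0, _ => true
  | fuel+1, i =>
    if i < 3 then
      match PySem.List.pyGet? s i with
      | none => false   -- IndexError (unreachable: length is 6)
      | some c =>
        if !("AZERTYUIOPQSDFGHJKLMWXCVBN".toList.contains c) then false
        else iscomWhile1 s fuel (i+1)
    else true

-- second while loop: while(j<6): if chaine[j] not in '0123456789': return False; j=j+1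
def iscomWhile2 (s : List Char) : Nat → Int → Bool
  | 0, _ => true
  | fuel+1, j =>
    if j < 6 then
      match PySem.List.pyGet? s j with
      | none => false   -- IndexError (unreachable: length is 6)
      | some c =>
        if !("0123456789".toList.contains c) then false
        else iscomWhile2 s fuel (j+1)
    else true

def iscomValide (chaine : String) : Bool :=
  let s := chaine.toList
  if PySem.Str.len chaine ≠ 6 then false
  else if iscomWhile1 s 3 0 = false then false      -- early 'return False' from the first loop
  else if iscomWhile2 s 3 3 = false then false      -- early 'return False' from the second loop
  else true                                          -- return res (= True)

-- ===== PORT B =====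
-- 'L' if 'A' <= c <= 'Z' else 'D' if '0' <= c <= '9' else '?'
def pvClassify (c : Char) : Char :=
  if 'A' ≤ c ∧ c ≤ 'Z' then 'L' else if '0' ≤ c ∧ c ≤ '9' then 'D' else '?'

def iscomValide_alt (chaine : String) : Bool :=
  decide (chaine.toList.map pvClassify = ['L','L','L','D','D','D'])

-- ===== PRECONDITION & SPEC =====
def Spec_iscomValide (chaine : String) (out : Bool) : Prop := out = iscomValide_alt chaine
instance (chaine : String) (out : Bool) : Decidable (Spec_iscomValide chaine out) := by unfold Spec_iscomValide; infer_instance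

-- ===== CLAIM (what is proved, stated in full; the proofs are below) =====
def Claim_equal_iscomValide : Prop := ∀ (chaine : String), Dom_iscomValide chaine → Spec_iscomValide chaine (iscomValide chaine)

-- ===== LEMMAS AND PROOFS =====

-- a char lies among the shuffled alphabet's characters iff its class code is 'L'
theorem classify_L (c : Char) :
    (c ∈ "AZERTYUIOPQSDFGHJKLMWXCVBN".toList) ↔ pvClassify c = 'L' := by
  have e : "AZERTYUIOPQSDFGHJKLMWXCVBN".toList = ['A','Z','E','R','T','Y','U','I','O','P','Q','S','D','F','G','H','J','K','L','M','W','X','C','V','B','N'] := rfl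
  rw [e]
  unfold pvClassify
  split_ifs with h1 h2 <;>
    simp_all [Char.ext_iff, Char.le_def, UInt32.le_iff_toNat_le, UInt32.ext_iff] <;>
    (have := c.val.toNat_lt_size; omega)

-- a char lies among the digit string's characters iff its class code is 'D'
theorem classify_D (c : Char) :
    (c ∈ "0123456789".toList) ↔ pvClassify c = 'D' := by
  have e : "0123456789".toList = ['0','1','2','3','4','5','6','7','8','9'] := rfl
  rw [e]
  unfold pvClassify
  split_ifs with h1 h2 <;>
    simp_all [Char.ext_iff, Char.le_def, UInt32.le_iff_toNat_le, UInt32.ext_iff] <;>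
    (have := c.val.toNat_lt_size; omega)

-- ===== VERDICT (by name: the statement is the Claim_ definition above) =====
theorem iscomValide_spec : Claim_equal_iscomValide := by
  intro ch _hdom
  unfold Spec_iscomValide iscomValide iscomValide_alt
  rw [PySem.Str.len_eq]
  generalize ch.toList = l
  by_cases h6 : l.length = 6
  · rcases l with _|⟨a, _|⟨b, _|⟨c, _|⟨d, _|⟨e, _|⟨f, _|⟨g, l⟩⟩⟩⟩⟩⟩⟩ <;>
      try simp at h6
    simp only [iscomWhile1.eq_def, iscomWhile2.eq_def, PySem.List.pyGet?, PySem.List.pyIdx?]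
    norm_num [pysem, classify_L, classify_D]
    have t2 : Int.toNat 2 = 2 := rfl
    have t3 : Int.toNat 3 = 3 := rfl
    have t4 : Int.toNat 4 = 4 := rfl
    have t5 : Int.toNat 5 = 5 := rfl
    simp only [t2, t3, t4, t5, List.getElem_cons_succ, List.getElem_cons_zero, Bool.and_assoc]
  · have h6' : (l.length : Int) ≠ 6 := by exact_mod_cast h6
    have hm : l.map pvClassify ≠ ['L','L','L','D','D','D'] := by
      intro h; apply h6; simpa using congrArg List.length h
    simp [h6', hm]
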